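-- pv_equiv track=rewrite | github.com/TinyTapeout/tinytapeout-sky-25a-sources | tt_um_top_layer/test/test.py | extract_event_intervals
-- ===== SOURCE A (Python) =====
-- def extract_event_intervals(event_list):
--     from collections import defaultdict
--     intervals = defaultdict(list)
--     if not event_list:
--         return dict(intervals)
--     cur = event_list[0]; start = 0
--     for i in range(1, len(event_list)):
--         if event_list[i] != cur:
--             intervals[cur].append([start, i - 1])
--             cur = event_list[i]; start = i
--     intervals[cur].append([start, len(event_list) - 1])
--     return dict(intervals)
-- ===== SOURCE B (Python) =====
-- def extract_event_intervals(event_list):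
--     from collections import defaultdict
--     n = len(event_list)
--     starts = [i for i in range(n) if i == 0 or event_list[i] != event_list[i - 1]]
--     ends = [i for i in range(n) if i == n - 1 or event_list[i] != event_list[i + 1]]
--     intervals = defaultdict(list)
--     for s, e in zip(starts, ends):
--         intervals[event_list[s]].append([s, e])
--     return dict(intervals)
-- ===== Notes on version B (the rewrite author's own statement) =====
-- stated objective: alternative
-- what changed: Replaces A's stateful single pass (carried cur/start, change-detection flush, trailing append) by staged declarative passes: two comprehensions detect run boundaries by comparing adjacent elements (a starts list and an ends list), which are then zipped into the per-value interval dict.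
import Mathlib
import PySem

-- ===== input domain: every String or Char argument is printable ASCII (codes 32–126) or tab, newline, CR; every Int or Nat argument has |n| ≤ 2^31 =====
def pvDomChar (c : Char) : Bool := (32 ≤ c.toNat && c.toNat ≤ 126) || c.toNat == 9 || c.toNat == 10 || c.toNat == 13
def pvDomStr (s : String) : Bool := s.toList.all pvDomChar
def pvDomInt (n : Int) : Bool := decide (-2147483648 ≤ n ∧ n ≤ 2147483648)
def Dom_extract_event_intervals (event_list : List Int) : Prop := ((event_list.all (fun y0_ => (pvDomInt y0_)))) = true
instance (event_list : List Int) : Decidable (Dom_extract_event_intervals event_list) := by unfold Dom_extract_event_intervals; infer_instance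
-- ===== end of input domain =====

-- B replaces A's stateful single pass by staged declarative passes: two comprehensions
-- detect run starts/ends by adjacent comparison, then the lists are zipped into the dict
-- (objective: alternative decomposition, same O(n) cost).

-- ===== PORT A =====
-- A's loop body, extracted as a helper; state = (intervals, cur, start)
def pvStepA (el : List Int) (s : PySem.Dict Int (List (List Int)) × Int × Int) (i : Int) :
    PySem.Dict Int (List (List Int)) × Int × Int :=
  if PySem.List.pyGetD el i 0 ≠ s.2.1 then
    (s.1.modify s.2.1 [] (fun l => l ++ [[s.2.2, i - 1]]), PySem.List.pyGetD el i 0, i)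
  else s

def extract_event_intervals (event_list : List Int) : List (Int × List (List Int)) :=
  if event_list.isEmpty then (PySem.Dict.empty : PySem.Dict Int (List (List Int))).items
  else
    let r := (PySem.List.pyRange 1 (event_list.length : Int) 1).foldl (pvStepA event_list)
      (PySem.Dict.empty, PySem.List.pyGetD event_list 0 0, 0)
    (r.1.modify r.2.1 [] (fun l => l ++ [[r.2.2, (event_list.length : Int) - 1]])).items

-- ===== PORT B =====
-- the two comprehension guards; Python's short-circuit `or` guarantees the getD
-- indices are in range wherever their value matters, so getD is exact here
def pvIsStart (el : List Int) (i : Nat) : Bool :=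
  i == 0 || !(el.getD i 0 == el.getD (i - 1) 0)

def pvIsEnd (el : List Int) (i : Nat) : Bool :=
  i == el.length - 1 || !(el.getD i 0 == el.getD (i + 1) 0)

-- range(n) over n = len(event_list) ≥ 0 is ported as List.range n
def extract_event_intervals_alt (event_list : List Int) : List (Int × List (List Int)) :=
  let starts := (List.range event_list.length).filter (pvIsStart event_list)
  let ends := (List.range event_list.length).filter (pvIsEnd event_list)
  ((starts.zip ends).foldl
    (fun d se => d.modify (event_list.getD se.1 0) []
      (fun l => l ++ [[(se.1 : Int), (se.2 : Int)]]))
    (PySem.Dict.empty : PySem.Dict Int (List (List Int)))).items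

-- ===== PRECONDITION & SPEC =====
def Spec_extract_event_intervals (event_list : List Int) (out : List (Int × List (List Int))) : Prop := out = extract_event_intervals_alt event_list
instance (event_list : List Int) (out : List (Int × List (List Int))) : Decidable (Spec_extract_event_intervals event_list out) := by unfold Spec_extract_event_intervals; infer_instance

-- ===== CLAIM (what is proved, stated in full; the proofs are below) =====
def Claim_equal_extract_event_intervals : Prop := ∀ (event_list : List Int), Dom_extract_event_intervals event_list → Spec_extract_event_intervals event_list (extract_event_intervals event_list)

-- ===== LEMMAS AND PROOFS =====

-- proof-only reference: the run scan both programs are shown equal to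
def pvSkipRun (el : List Int) (x : Int) (j : Nat) : Nat :=
  if h : j < el.length then
    if el[j] = x then pvSkipRun el x (j + 1) else j
  else j
  termination_by el.length - j

theorem pvSkipRun_ge (el : List Int) (x : Int) (j : Nat) : j ≤ pvSkipRun el x j := by
  fun_induction pvSkipRun el x j with
  | case1 j h heq ih => omega
  | case2 j h heq => omega
  | case3 j h => omega

def pvGo (el : List Int) (i : Nat) (d : PySem.Dict Int (List (List Int))) :
    PySem.Dict Int (List (List Int)) :=
  if h : i < el.length then
    let j := pvSkipRun el el[i] i
    pvGo el j (d.modify el[i] [] (fun l => l ++ [[(i : Int), (j : Int) - 1]]))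
  else d
  termination_by el.length - i
  decreasing_by
    have h1 : i + 1 ≤ pvSkipRun el el[i] (i + 1) := pvSkipRun_ge el el[i] (i + 1)
    have h2 : pvSkipRun el el[i] i = pvSkipRun el el[i] (i + 1) := by
      rw [pvSkipRun]; simp [h]
    omega

theorem pvSkipRun_le (el : List Int) (x : Int) (j : Nat) (hj : j ≤ el.length) :
    pvSkipRun el x j ≤ el.length := by
  fun_induction pvSkipRun el x j with
  | case1 j h heq ih => exact ih (by omega)
  | case2 j h heq => omega
  | case3 j h => omega

theorem pvSkipRun_mem (el : List Int) (x : Int) (j : Nat) :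
    ∀ k (hk : k < el.length), j ≤ k → k < pvSkipRun el x j → el[k] = x := by
  fun_induction pvSkipRun el x j with
  | case1 j h heq ih =>
    intro k hk h1 h2
    rcases Nat.eq_or_lt_of_le h1 with h | h
    · subst h; exact heq
    · exact ih k hk h h2
  | case2 j h heq => intro k hk h1 h2; omega
  | case3 j h => intro k hk h1 h2; omega

theorem pvSkipRun_stop (el : List Int) (x : Int) (j : Nat)
    (h2 : pvSkipRun el x j < el.length) : el[pvSkipRun el x j] ≠ x := by
  fun_induction pvSkipRun el x j with
  | case1 j h heq ih => exact ih h2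
  | case2 j h heq => exact heq
  | case3 j h => omega

-- pvSkipRun stops exactly at the first index ≥ s whose element differs from x
theorem pvSkipRun_eq (el : List Int) (x : Int) :
    ∀ (m s j : Nat), j - s ≤ m → s ≤ j → j ≤ el.length →
      (∀ (h2 : j < el.length), el[j] ≠ x) →
      (∀ k (hk : k < el.length), s ≤ k → k < j → el[k] = x) →
      pvSkipRun el x s = j := by
  intro m
  induction m with
  | zero =>
    intro s j h1 h2 h3 hstop hall
    have hsj : s = j := by omega
    subst hsj
    rw [pvSkipRun]
    by_cases h : s < el.length
    · rw [dif_pos h, if_neg (hstop h)]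
    · rw [dif_neg h]
  | succ m ih =>
    intro s j h1 h2 h3 hstop hall
    by_cases hsj : s = j
    · subst hsj
      rw [pvSkipRun]
      by_cases h : s < el.length
      · rw [dif_pos h, if_neg (hstop h)]
      · rw [dif_neg h]
    · have hslen : s < el.length := by omega
      rw [pvSkipRun, dif_pos hslen,
        if_pos (hall s hslen (le_refl s) (by omega))]
      exact ih (s + 1) j (by omega) (by omega) h3 hstop
        (fun k hk h1k h2k => hall k hk (by omega) h2k)

-- A's final flush from a state whose run reaches the end equals one step of pvGo
theorem loopA_end (el : List Int) (s : Nat) (d : PySem.Dict Int (List (List Int)))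
    (hs : s < el.length)
    (hall : ∀ k (hk : k < el.length), s ≤ k → k < el.length → el[k] = el[s]'hs) :
    d.modify (el[s]'hs) [] (fun l => l ++ [[(s : Int), (el.length : Int) - 1]])
      = pvGo el s d := by
  rw [pvGo, dif_pos hs]
  have hskip : pvSkipRun el (el[s]'hs) s = el.length :=
    pvSkipRun_eq el (el[s]'hs) el.length s el.length (by omega) (by omega) (le_refl _)
      (fun h2 => absurd h2 (by omega)) hall
  rw [hskip, pvGo, dif_neg (by omega)]

-- main loop correspondence (A's fold from a mid-run state vs the run scan)
theorem loopA (el : List Int) :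
    ∀ (m s i : Nat) (d : PySem.Dict Int (List (List Int))) (hs : s < el.length),
      el.length - i ≤ m → s ≤ i → i ≤ el.length →
      (∀ k (hk : k < el.length), s ≤ k → k < i → el[k] = el[s]'hs) →
      (let r := (PySem.List.pyRange (i : Int) (el.length : Int) 1).foldl (pvStepA el)
         (d, el[s]'hs, (s : Int));
       r.1.modify r.2.1 [] (fun l => l ++ [[r.2.2, (el.length : Int) - 1]]))
      = pvGo el s d := by
  intro m
  induction m with
  | zero =>
    intro s i d hs h1 h2 h3 hall
    have hi : i = el.length := by omega
    subst hi
    rw [PySem.List.pyRange_one_eq_nil (le_refl _)]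
    simp only [List.foldl_nil]
    exact loopA_end el s d hs (fun k hk h1k h2k => hall k hk h1k h2k)
  | succ m ih =>
    intro s i d hs h1 h2 h3 hall
    by_cases hi : i < el.length
    · rw [PySem.List.pyRange_one_cons (by exact_mod_cast hi)]
      simp only [List.foldl_cons]
      have hget : PySem.List.pyGetD el (i : Int) 0 = el[i]'hi := by
        rw [PySem.List.pyGetD_natCast, List.getD_eq_getElem el 0 hi]
      by_cases hcase : el[i]'hi = el[s]'hs
      · have hstep : pvStepA el (d, el[s]'hs, (s : Int)) (i : Int)
            = (d, el[s]'hs, (s : Int)) := by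
          rw [pvStepA]
          simp only [hget, hcase, ne_eq, not_true_eq_false, if_false]
        rw [hstep]
        have := ih s (i + 1) d hs (by omega) (by omega) (by omega)
          (fun k hk h1k h2k => by
            rcases Nat.lt_succ_iff_lt_or_eq.mp h2k with h | h
            · exact hall k hk h1k h
            · subst h; exact hcase)
        rw [← this]
        push_cast
        rfl
      · have hstep : pvStepA el (d, el[s]'hs, (s : Int)) (i : Int)
            = (d.modify (el[s]'hs) [] (fun l => l ++ [[(s : Int), (i : Int) - 1]]),
               el[i]'hi, (i : Int)) := by
          rw [pvStepA]
          simp only [hget, hcase, ne_eq, not_false_eq_true, if_true]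
        rw [hstep]
        have := ih i (i + 1)
          (d.modify (el[s]'hs) [] (fun l => l ++ [[(s : Int), (i : Int) - 1]]))
          hi (by omega) (by omega) (by omega)
          (fun k hk h1k h2k => by
            have : k = i := by omega
            subst this; rfl)
        have hcast : ((i : Int) + 1) = (((i + 1 : Nat) : Int)) := by push_cast; ring
        rw [hcast, this]
        have hskip : pvSkipRun el (el[s]'hs) s = i :=
          pvSkipRun_eq el (el[s]'hs) el.length s i (by omega) h2 (by omega)
            (fun h2' => hcase) (fun k hk h1k h2k => hall k hk h1k h2k)
        conv_rhs => rw [pvGo]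
        simp only [dif_pos hs, hskip]
    · have hieq : i = el.length := by omega
      subst hieq
      rw [PySem.List.pyRange_one_eq_nil (le_refl _)]
      simp only [List.foldl_nil]
      exact loopA_end el s d hs (fun k hk h1k h2k => hall k hk h1k h2k)

-- B side: the filtered starts/ends of the tail segment [s, n) form the run decomposition
theorem loopB (el : List Int) :
    ∀ (m s : Nat) (d : PySem.Dict Int (List (List Int))),
      el.length - s ≤ m → s ≤ el.length →
      (s < el.length → pvIsStart el s = true) →
      (((List.range' s (el.length - s)).filter (pvIsStart el)).zip
        ((List.range' s (el.length - s)).filter (pvIsEnd el))).foldl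
        (fun d se => d.modify (el.getD se.1 0) []
          (fun l => l ++ [[(se.1 : Int), (se.2 : Int)]])) d
      = pvGo el s d := by
  intro m
  induction m with
  | zero =>
    intro s d h1 h2 _
    have hs : s = el.length := by omega
    subst hs
    simp only [Nat.sub_self, List.range'_zero, List.filter_nil, List.zip_nil_left,
      List.foldl_nil]
    rw [pvGo, dif_neg (by omega)]
  | succ m ih =>
    intro s d h1 h2 hstart
    by_cases hs : s < el.length
    · set j := pvSkipRun el (el[s]'hs) s with hj_def
      have hsj : s + 1 ≤ j := by
        rw [hj_def, pvSkipRun, dif_pos hs, if_pos rfl]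
        exact pvSkipRun_ge _ _ _
      have hjn : j ≤ el.length := pvSkipRun_le el (el[s]'hs) s (by omega)
      have hrun : ∀ k (hk : k < el.length), s ≤ k → k < j → el[k] = el[s]'hs :=
        fun k hk hk1 hk2 => pvSkipRun_mem el (el[s]'hs) s k hk hk1 hk2
      have hsplit : List.range' s (el.length - s)
          = List.range' s (j - s) ++ List.range' j (el.length - j) := by
        have h := @List.range'_append s (j - s) (el.length - j) 1
        rw [show s + 1 * (j - s) = j by omega,
          show (j - s) + (el.length - j) = el.length - s by omega] at h
        exact h.symm
      have hstart1 : (List.range' s (j - s)).filter (pvIsStart el) = [s] := by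
        rw [show j - s = (j - s - 1) + 1 by omega, List.range'_succ,
          List.filter_cons_of_pos (hstart hs)]
        have hnil : (List.range' (s + 1) (j - s - 1)).filter (pvIsStart el) = [] := by
          refine List.filter_eq_nil_iff.mpr (fun a ha => ?_)
          obtain ⟨i, hi, rfl⟩ := List.mem_range'.mp ha
          have hb1 : s + 1 ≤ s + 1 + 1 * i := by omega
          have hb2 : s + 1 + 1 * i < j := by omega
          have hlt : s + 1 + 1 * i < el.length := by omega
          have hlt' : s + 1 + 1 * i - 1 < el.length := by omega
          have e1 : el.getD (s + 1 + 1 * i) 0 = el[s]'hs := by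
            rw [List.getD_eq_getElem el 0 hlt]; exact hrun _ hlt (by omega) hb2
          have e2 : el.getD (s + 1 + 1 * i - 1) 0 = el[s]'hs := by
            rw [List.getD_eq_getElem el 0 hlt']; exact hrun _ hlt' (by omega) (by omega)
          simp only [pvIsStart]
          rw [e1, e2]
          simp
        rw [hnil]
      have hend1 : (List.range' s (j - s)).filter (pvIsEnd el) = [j - 1] := by
        rw [show j - s = (j - 1 - s) + 1 by omega, List.range'_concat,
          show s + 1 * (j - 1 - s) = j - 1 by omega, List.filter_append]
        have hnil : (List.range' s (j - 1 - s)).filter (pvIsEnd el) = [] := by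
          refine List.filter_eq_nil_iff.mpr (fun a ha => ?_)
          obtain ⟨i, hi, rfl⟩ := List.mem_range'.mp ha
          have hb2 : s + 1 * i < j - 1 := by omega
          have hlt : s + 1 * i < el.length := by omega
          have hlt' : s + 1 * i + 1 < el.length := by omega
          have e1 : el.getD (s + 1 * i) 0 = el[s]'hs := by
            rw [List.getD_eq_getElem el 0 hlt]; exact hrun _ hlt (by omega) (by omega)
          have e2 : el.getD (s + 1 * i + 1) 0 = el[s]'hs := by
            rw [List.getD_eq_getElem el 0 hlt']; exact hrun _ hlt' (by omega) (by omega)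
          simp only [pvIsEnd]
          rw [e1, e2]
          simp
          omega
        have hone : pvIsEnd el (j - 1) = true := by
          by_cases hj : j < el.length
          · have hlt : j - 1 < el.length := by omega
            have e1 : el.getD (j - 1) 0 = el[s]'hs := by
              rw [List.getD_eq_getElem el 0 hlt]; exact hrun _ hlt (by omega) (by omega)
            have e2 : el.getD (j - 1 + 1) 0 = el[j]'hj := by
              rw [show j - 1 + 1 = j by omega, List.getD_eq_getElem el 0 hj]
            have hne : el[j]'hj ≠ el[s]'hs := pvSkipRun_stop el (el[s]'hs) s (by omega)
            have hf : (el[s]'hs == el[j]'hj) = false := by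
              simp only [beq_eq_false_iff_ne, ne_eq]
              exact fun h => hne h.symm
            simp only [pvIsEnd]
            rw [e1, e2]
            simp [hf]
          · simp [pvIsEnd, show j - 1 = el.length - 1 by omega]
        simp [hnil, hone]
      rw [hsplit, List.filter_append, List.filter_append, hstart1, hend1,
        List.singleton_append, List.singleton_append, List.zip_cons_cons,
        List.foldl_cons]
      have hkey : el.getD s 0 = el[s]'hs := List.getD_eq_getElem el 0 hs
      have hval : ((j - 1 : Nat) : Int) = (j : Int) - 1 := by omega
      have hnext : j < el.length → pvIsStart el j = true := by
        intro hj
        have e1 : el.getD j 0 = el[j]'hj := List.getD_eq_getElem el 0 hj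
        have hlt : j - 1 < el.length := by omega
        have e2 : el.getD (j - 1) 0 = el[s]'hs := by
          rw [List.getD_eq_getElem el 0 hlt]; exact hrun _ hlt (by omega) (by omega)
        have hne : el[j]'hj ≠ el[s]'hs := pvSkipRun_stop el (el[s]'hs) s (by omega)
        have hf : (el[j]'hj == el[s]'hs) = false := by
          simp only [beq_eq_false_iff_ne, ne_eq]
          exact hne
        simp only [pvIsStart]
        rw [e1, e2]
        simp [hf]
      have := ih j (d.modify (el.getD s 0) []
        (fun l => l ++ [[(s : Int), ((j - 1 : Nat) : Int)]])) (by omega) hjn hnext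
      rw [this]
      conv_rhs => rw [pvGo]
      simp only [dif_pos hs, ← hj_def, hkey, hval]
    · have hse : s = el.length := by omega
      subst hse
      simp only [Nat.sub_self, List.range'_zero, List.filter_nil, List.zip_nil_left,
        List.foldl_nil]
      rw [pvGo, dif_neg (by omega)]

-- ===== VERDICT (by name: the statement is the Claim_ definition above) =====
theorem extract_event_intervals_spec : Claim_equal_extract_event_intervals := by
  intro el _
  unfold Spec_extract_event_intervals
  have hB : extract_event_intervals_alt el = (pvGo el 0 PySem.Dict.empty).items := by
    unfold extract_event_intervals_alt
    simp only [List.range_eq_range']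
    have h := loopB el el.length 0 PySem.Dict.empty (by omega) (by omega)
      (fun _ => by simp [pvIsStart])
    simp only [Nat.sub_zero] at h
    rw [h]
  rw [hB]
  cases el with
  | nil =>
    rw [pvGo]
    simp [extract_event_intervals]
  | cons x xs =>
    unfold extract_event_intervals
    simp only [List.isEmpty_cons, if_false, Bool.false_eq_true]
    have hs : 0 < (x :: xs).length := by simp
    have h0 : PySem.List.pyGetD (x :: xs) 0 0 = (x :: xs)[0]'hs := by
      rw [PySem.List.pyGetD_zero]; rfl
    have h := loopA (x :: xs) (x :: xs).length 0 1 PySem.Dict.empty hs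
      (by omega) (by omega) (by simp) (fun k hk h1k h2k => by
        have : k = 0 := by omega
        subst this; rfl)
    simp only at h
    simp only [Nat.cast_zero, Nat.cast_one] at h
    rw [h0, h]
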